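-- pv_equiv track=rewrite | github.com/guocheng18/Sequential-Recommendation-Datasets | srdatasets/generate.py | _augment_sequence
-- ===== SOURCE A (Python) =====
-- from typing import Dict, List, Optional, Tuple
--
-- Sequence = List[int]
--
-- Data = Tuple[int, Sequence, Sequence]
--
-- def _augment_sequence(
--     seq: Sequence, user_id: int, input_len: int, target_len: int
-- ) -> List[Data]:
--     """ `seq` is assumed to be longer than `target_len`,
--     this has been guaranteed when splitting sequences
--     """
--     lack_num = input_len + target_len - len(seq)
--     if lack_num > 0:
--         # padding 0
--         datalist = [(user_id, [0] * lack_num + seq[:-target_len], seq[-target_len:])]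
--     else:
--         datalist = [
--             (
--                 user_id,
--                 seq[i : i + input_len],
--                 seq[i + input_len : i + input_len + target_len],
--             )
--             for i in range(1 - lack_num)
--         ]
--     return datalist
-- ===== SOURCE B (Python) =====
-- def _augment_sequence(seq, user_id, input_len, target_len):
--     lack_num = input_len + target_len - len(seq)
--     if lack_num > 0:
--         # too short: pad with zeros, single example
--         return [(user_id, [0] * lack_num + seq[:-target_len], seq[-target_len:])]
--     # roll one combined window over the sequence, splitting it at input_len
--     w = seq[: input_len + target_len]
--     out = [(user_id, w[:input_len], w[input_len:])]
--     for x in seq[input_len + target_len:]: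
--         w = (w + [x])[1:]
--         out.append((user_id, w[:input_len], w[input_len:]))
--     return out
-- ===== Notes on version B (the rewrite author's own statement) =====
-- stated objective: alternative
-- what changed: Replaces the sliding-window slicing comprehension by an incremental loop that rolls one combined window (append entering element, drop the leaving one) and splits it at input_len; Pre_ excludes negative window lengths on the no-padding path, where A's values are accidental negative-index slice wraparound.
-- outside the precondition, e.g. on _augment_sequence([1], 5, -1, 1): A returns [(5, [], []), (5, [], [1])], B returns [(5, [], []), (5, [], [])]
import Mathlib
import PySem

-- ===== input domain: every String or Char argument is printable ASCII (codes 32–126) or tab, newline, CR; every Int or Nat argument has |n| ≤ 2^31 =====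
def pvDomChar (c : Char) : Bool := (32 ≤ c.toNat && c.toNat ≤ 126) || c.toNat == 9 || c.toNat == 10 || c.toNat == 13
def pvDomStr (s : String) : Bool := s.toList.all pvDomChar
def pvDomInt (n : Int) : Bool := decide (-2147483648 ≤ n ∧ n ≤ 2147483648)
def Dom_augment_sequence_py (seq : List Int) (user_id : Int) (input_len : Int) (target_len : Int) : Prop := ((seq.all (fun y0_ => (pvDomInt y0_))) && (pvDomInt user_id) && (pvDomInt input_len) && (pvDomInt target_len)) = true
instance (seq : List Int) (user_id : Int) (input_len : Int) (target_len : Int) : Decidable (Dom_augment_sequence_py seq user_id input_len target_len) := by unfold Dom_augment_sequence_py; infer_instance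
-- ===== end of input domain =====

-- B keeps the padding base case but replaces the slicing comprehension by an incremental roll of one combined window split at input_len (alternative mechanism, same cost).


-- ===== PORT A =====
def augment_sequence_py (seq : List Int) (user_id : Int) (input_len : Int) (target_len : Int) : List (Int × List Int × List Int) :=
  let lack_num : Int := input_len + target_len - (seq.length : Int)
  if lack_num > 0 then
    [(user_id,
      List.replicate lack_num.toNat 0 ++ PySem.List.slice seq none (some (-target_len)),
      PySem.List.slice seq (some (-target_len)) none)]
  else
    (PySem.List.pyRange 0 (1 - lack_num) 1).map (fun i =>
      (user_id,
       PySem.List.slice seq (some i) (some (i + input_len)),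
       PySem.List.slice seq (some (i + input_len)) (some (i + input_len + target_len))))

-- ===== PORT B =====
-- B's loop: for x in rest, w = (w + [x])[1:], append the split of w at input_len.
def augSlide (user_id input_len : Int) :
    List Int → List (Int × List Int × List Int) → List Int → List (Int × List Int × List Int)
  | _, out, [] => out
  | w, out, x :: rest =>
      let w' := PySem.List.slice (w ++ [x]) (some 1) none
      augSlide user_id input_len w'
        (out ++ [(user_id,
                  PySem.List.slice w' none (some input_len),
                  PySem.List.slice w' (some input_len) none)]) rest

def augment_sequence_py_alt (seq : List Int) (user_id : Int) (input_len : Int) (target_len : Int) : List (Int × List Int × List Int) :=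
  let lack_num : Int := input_len + target_len - (seq.length : Int)
  if lack_num > 0 then
    [(user_id,
      List.replicate lack_num.toNat 0 ++ PySem.List.slice seq none (some (-target_len)),
      PySem.List.slice seq (some (-target_len)) none)]
  else
    let w := PySem.List.slice seq none (some (input_len + target_len))
    augSlide user_id input_len w
      [(user_id,
        PySem.List.slice w none (some input_len),
        PySem.List.slice w (some input_len) none)]
      (PySem.List.slice seq (some (input_len + target_len)) none)

-- ===== PRECONDITION & SPEC =====
-- Pre_ excludes only negative window lengths reaching the no-padding path: A still returns
-- there, but its values come from accidental Python negative-index slice wraparound, a corner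
-- the function's purpose (fixed-size sliding windows) rules out; B's natural rolling window
-- returns different (all-empty) parts there.
def Pre_augment_sequence_py (seq : List Int) (user_id : Int) (input_len : Int) (target_len : Int) : Prop :=
  (0 ≤ input_len ∧ 0 ≤ target_len) ∨ (seq.length : Int) < input_len + target_len
instance (seq : List Int) (user_id : Int) (input_len : Int) (target_len : Int) : Decidable (Pre_augment_sequence_py seq user_id input_len target_len) := by unfold Pre_augment_sequence_py; infer_instance
def pvWitness_augment_sequence_py : List Int × Int × Int × Int := ([1, 2, 3], 7, 2, 1)

def Spec_augment_sequence_py (seq : List Int) (user_id : Int) (input_len : Int) (target_len : Int) (out : List (Int × List Int × List Int)) : Prop := out = augment_sequence_py_alt seq user_id input_len target_len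
instance (seq : List Int) (user_id : Int) (input_len : Int) (target_len : Int) (out : List (Int × List Int × List Int)) : Decidable (Spec_augment_sequence_py seq user_id input_len target_len out) := by unfold Spec_augment_sequence_py; infer_instance

-- ===== CLAIM (what is proved, stated in full; the proofs are below) =====
def Claim_equal_augment_sequence_py : Prop := ∀ (seq : List Int) (user_id : Int) (input_len : Int) (target_len : Int), Dom_augment_sequence_py seq user_id input_len target_len → Pre_augment_sequence_py seq user_id input_len target_len → Spec_augment_sequence_py seq user_id input_len target_len (augment_sequence_py seq user_id input_len target_len)

-- ===== LEMMAS AND PROOFS =====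

-- the i-th window pair
def augWin (seq : List Int) (user_id : Int) (j k i : Nat) : Int × List Int × List Int :=
  (user_id, ((seq.drop i).take j), ((seq.drop (i + j)).take k))

-- sliding one step: append the entering element, drop the leaving one
theorem augStep (seq : List Int) (a m : Nat) (h : a + m < seq.length) :
    ((seq.drop a).take m ++ [seq[a + m]]).drop 1 = (seq.drop (a + 1)).take m := by
  have h1 : (seq.drop a).take (m + 1) = (seq.drop a).take m ++ [seq[a + m]] := by
    rw [List.take_succ, List.getElem?_drop, List.getElem?_eq_getElem (by omega : a + m < seq.length)]
    rfl
  rw [← h1, List.drop_take, List.drop_drop, Nat.add_sub_cancel]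

-- loop invariant: starting from window i with i + j + k + n = len, the loop appends windows i+1, i+2, …
theorem augSlide_invariant (seq : List Int) (user_id : Int) (j k : Nat) :
    ∀ (n : Nat) (acc : List (Int × List Int × List Int)) (i : Nat), i + j + k + n = seq.length →
    augSlide user_id (j : Int) ((seq.drop i).take (j + k)) acc (seq.drop (i + j + k))
      = acc ++ (List.range n).map (fun m => augWin seq user_id j k (i + 1 + m)) := by
  intro n
  induction n with
  | zero =>
      intro acc i hi
      have : seq.drop (i + j + k) = [] := by
        apply List.drop_eq_nil_of_le; omega
      rw [this]
      simp [augSlide]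
  | succ n ih =>
      intro acc i hi
      have hlt : i + j + k < seq.length := by omega
      have hd : seq.drop (i + j + k) = seq[i + j + k] :: seq.drop (i + j + k + 1) := by
        rw [List.drop_eq_getElem_cons hlt]
      rw [hd, augSlide]
      have hslice : ∀ l : List Int, PySem.List.slice l (some 1) none = l.drop 1 := by
        intro l
        exact_mod_cast PySem.List.slice_from_natCast l 1
      have hw' : PySem.List.slice ((seq.drop i).take (j + k) ++ [seq[i + j + k]]) (some 1) none
          = (seq.drop (i + 1)).take (j + k) := by
        rw [hslice]
        have := augStep seq i (j + k) (by omega)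
        simpa [Nat.add_assoc] using this
      have hinp : ((seq.drop (i + 1)).take (j + k)).take j = (seq.drop (i + 1)).take j := by
        rw [List.take_take]
        congr 1
        omega
      have htgt : ((seq.drop (i + 1)).take (j + k)).drop j = (seq.drop (i + 1 + j)).take k := by
        rw [List.drop_take, List.drop_drop]
        congr 1
        omega
      rw [hw',
        show PySem.List.slice ((seq.drop (i + 1)).take (j + k)) none (some (j : Int))
            = (seq.drop (i + 1)).take j from
          (PySem.List.slice_to_natCast _ j).trans hinp,
        show PySem.List.slice ((seq.drop (i + 1)).take (j + k)) (some (j : Int)) none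
            = (seq.drop (i + 1 + j)).take k from
          (PySem.List.slice_from_natCast _ j).trans htgt,
        show i + j + k + 1 = (i + 1) + j + k by omega,
        ih (acc ++ [(user_id, (seq.drop (i + 1)).take j, (seq.drop (i + 1 + j)).take k)]) (i + 1)
          (by omega),
        List.range_succ_eq_map, List.map_cons, List.map_map]
      have hsh : (List.range n).map ((fun m => augWin seq user_id j k (i + 1 + m)) ∘ (· + 1))
          = (List.range n).map (fun m => augWin seq user_id j k (i + 1 + 1 + m)) := by
        apply List.map_congr_left
        intro a _
        simp only [Function.comp]
        congr 1
        omega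
      rw [hsh]
      simp [augWin]

-- ===== VERDICT (by name: the statement is the Claim_ definition above) =====
theorem augment_sequence_py_spec : Claim_equal_augment_sequence_py := by
  intro seq user_id input_len target_len _hdom hpre
  unfold Spec_augment_sequence_py augment_sequence_py augment_sequence_py_alt
  by_cases h : input_len + target_len - (seq.length : Int) > 0
  · rw [if_pos h, if_pos h]
  · rw [if_neg h, if_neg h]
    obtain ⟨hil, htl⟩ : 0 ≤ input_len ∧ 0 ≤ target_len := by
      rcases hpre with hp | hgt
      · exact hp
      · exact absurd hgt (by omega)
    obtain ⟨j, rfl⟩ : ∃ j : Nat, input_len = (j : Int) := ⟨input_len.toNat, by omega⟩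
    obtain ⟨k, rfl⟩ : ∃ k : Nat, target_len = (k : Int) := ⟨target_len.toNat, by omega⟩
    have hjk : j + k ≤ seq.length := by omega
    have hjk' : ((j : Int) + (k : Int)) = ((j + k : Nat) : Int) := by push_cast; ring
    -- A's comprehension is the window list
    have hA : (PySem.List.pyRange 0 (1 - ((j : Int) + (k : Int) - (seq.length : Int))) 1).map
        (fun i => (user_id, PySem.List.slice seq (some i) (some (i + (j : Int))),
           PySem.List.slice seq (some (i + (j : Int))) (some (i + (j : Int) + (k : Int)))))
        = (List.range (seq.length - (j + k) + 1)).map (fun m => augWin seq user_id j k m) := by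
      rw [PySem.List.pyRange_one, List.map_map,
        show ((1 : Int) - ((j : Int) + (k : Int) - (seq.length : Int)) - 0).toNat
          = seq.length - (j + k) + 1 by omega]
      apply List.map_congr_left
      intro m _
      simp only [Function.comp, zero_add]
      rw [PySem.List.slice_natCast_add,
        show (m : Int) + (j : Int) = ((m + j : Nat) : Int) by push_cast; ring,
        PySem.List.slice_natCast_add]
      simp [augWin]
    rw [hA]
    -- B's initial window is window 0; then the loop's invariant finishes
    have hw0 : PySem.List.slice seq none (some ((j : Int) + (k : Int))) = (seq.drop 0).take (j + k) := by
      rw [hjk', PySem.List.slice_to_natCast]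
      simp
    have hrest : PySem.List.slice seq (some ((j : Int) + (k : Int))) none = seq.drop (0 + j + k) := by
      rw [hjk', PySem.List.slice_from_natCast]
      simp
    simp only [hw0, hrest]
    rw [show PySem.List.slice ((seq.drop 0).take (j + k)) none (some (j : Int))
          = (seq.drop 0).take j from
        (PySem.List.slice_to_natCast _ j).trans (by rw [List.take_take]; congr 1; omega),
      show PySem.List.slice ((seq.drop 0).take (j + k)) (some (j : Int)) none
          = (seq.drop (0 + j)).take k from
        (PySem.List.slice_from_natCast _ j).trans
          (by rw [List.drop_take, List.drop_drop]; congr 1; omega),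
      augSlide_invariant seq user_id j k (seq.length - (j + k)) _ 0 (by omega),
      List.range_succ_eq_map, List.map_cons, List.map_map]
    have hsh : (List.range (seq.length - (j + k))).map
          ((fun m => augWin seq user_id j k m) ∘ (· + 1))
        = (List.range (seq.length - (j + k))).map (fun m => augWin seq user_id j k (0 + 1 + m)) := by
      apply List.map_congr_left
      intro a _
      simp only [Function.comp]
      congr 1
      omega
    rw [hsh]
    simp [augWin]
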